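-- pv_equiv track=rewrite | github.com/darkoss1/pysymex | benchmark_insane.py | clean_nested_thresholds
-- ===== SOURCE A (Python) =====
-- def clean_nested_thresholds(x: int, y: int, z: int) -> int:
--     out = 0
--     for i in range(4):
--         for j in range(3):
--             if x + i > y - j:
--                 out += z + i - j
--             else:
--                 out -= z - i + j
--     return out
-- ===== SOURCE B (Python) =====
-- def clean_nested_thresholds(x: int, y: int, z: int) -> int:
--     # Condition x+i > y-j is equivalent to i+j >= k with k = y-x+1, so the
--     # number of true cells depends only on k.  The distribution of i+j over
--     # the 4x3 grid has tail counts #{(i,j): i+j >= k} = _TAIL[k] for 0<=k<=5.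
--     # Both branches contribute (i-j) (grid sum 6) plus +/-z, giving the
--     # closed form 6 + z*(2*T - 12) with T true cells.  No loops at all.
--     k = (y - x) + 1
--     if k <= 0:
--         t = 12
--     elif k >= 6:
--         t = 0
--     else:
--         t = _TAIL[k]
--     return 6 + z * (2 * t - 12)
--
-- _TAIL = [12, 11, 9, 6, 3, 1]
-- ===== Notes on version B (the rewrite author's own statement) =====
-- stated objective: simpler
-- what changed: B is loop-free: the grid condition x+i > y-j depends only on k = y-x+1, so B reads the true-cell count T from a precomputed tail-count table over i+j and returns the closed form 6 + z*(2*T - 12), instead of A's 4x3 double loop with two-branch signed accumulation.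
import Mathlib
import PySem

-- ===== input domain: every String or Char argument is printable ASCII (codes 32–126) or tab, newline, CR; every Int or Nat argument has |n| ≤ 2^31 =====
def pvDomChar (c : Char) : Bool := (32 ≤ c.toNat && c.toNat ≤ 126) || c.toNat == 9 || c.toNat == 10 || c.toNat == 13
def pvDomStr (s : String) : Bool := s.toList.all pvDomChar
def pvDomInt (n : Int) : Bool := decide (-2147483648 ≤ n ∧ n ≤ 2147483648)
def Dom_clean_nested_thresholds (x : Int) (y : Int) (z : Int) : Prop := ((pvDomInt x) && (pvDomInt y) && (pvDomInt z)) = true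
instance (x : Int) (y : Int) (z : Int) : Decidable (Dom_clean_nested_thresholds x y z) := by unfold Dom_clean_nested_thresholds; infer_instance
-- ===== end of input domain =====

-- B replaces A's 4x3 double loop and signed accumulation by a loop-free closed form: a tail-count table over i+j and the identity 6 + z*(2*T - 12) (objective: simpler).


-- ===== PORT A =====
def clean_nested_thresholds (x : Int) (y : Int) (z : Int) : Int :=
  (PySem.List.pyRange 0 4 1).foldl (fun out i =>
    (PySem.List.pyRange 0 3 1).foldl (fun out j =>
      if x + i > y - j then out + (z + i - j) else out - (z - i + j)) out) 0

-- ===== PORT B =====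
-- _TAIL from Source B
def pvTail : List Int := [12, 11, 9, 6, 3, 1]

def clean_nested_thresholds_alt (x : Int) (y : Int) (z : Int) : Int :=
  let k : Int := (y - x) + 1
  let t : Int :=
    if k ≤ 0 then 12
    else if k ≥ 6 then 0
    -- _TAIL[k]: the guards ensure 1 ≤ k ≤ 5, so pyGet? always returns some; .getD 0 only totalises
    else (PySem.List.pyGet? pvTail k).getD 0
  6 + z * (2 * t - 12)

-- ===== PRECONDITION & SPEC =====
def Spec_clean_nested_thresholds (x : Int) (y : Int) (z : Int) (out : Int) : Prop := out = clean_nested_thresholds_alt x y z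
instance (x : Int) (y : Int) (z : Int) (out : Int) : Decidable (Spec_clean_nested_thresholds x y z out) := by unfold Spec_clean_nested_thresholds; infer_instance

-- ===== CLAIM (what is proved, stated in full; the proofs are below) =====
def Claim_equal_clean_nested_thresholds : Prop := ∀ (x : Int) (y : Int) (z : Int), Dom_clean_nested_thresholds x y z → Spec_clean_nested_thresholds x y z (clean_nested_thresholds x y z)

-- ===== LEMMAS AND PROOFS =====

-- each grid condition depends only on y - x
theorem pv_cond_iff (x y i j : Int) : (x + i > y - j) = (y - x + 1 ≤ i + j) := by
  apply propext; omega

-- pulls the accumulator out of each branch, so the expanded fold stays linear in size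
theorem pv_step (c : Prop) [Decidable c] (t a b : Int) :
    (if c then t + a else t - b) = t + (if c then a else -b) := by
  split <;> ring

-- ===== VERDICT (by name: the statement is the Claim_ definition above) =====
theorem clean_nested_thresholds_spec : Claim_equal_clean_nested_thresholds := by
  intro x y z _
  unfold Spec_clean_nested_thresholds clean_nested_thresholds clean_nested_thresholds_alt
  rw [show PySem.List.pyRange 0 4 1 = [0, 1, 2, 3] from by decide,
      show PySem.List.pyRange 0 3 1 = [0, 1, 2] from by decide]
  rcases (by omega : y - x ≤ -1 ∨ y - x = 0 ∨ y - x = 1 ∨ y - x = 2 ∨ y - x = 3 ∨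
      y - x = 4 ∨ 5 ≤ y - x) with h | h | h | h | h | h | h
  · simp only [List.foldl, pv_step, pv_cond_iff]
    norm_num
    split_ifs <;> omega
  · simp only [List.foldl, pv_step, pv_cond_iff, h]
    norm_num [PySem.List.pyGet?, PySem.List.pyIdx?, pvTail]
    omega
  · simp only [List.foldl, pv_step, pv_cond_iff, h]
    norm_num [PySem.List.pyGet?, PySem.List.pyIdx?, pvTail]
    rw [show ([12, 11, 9, 6, 3, 1] : List Int)[Int.toNat 2] = 9 from by decide]
    omega
  · simp only [List.foldl, pv_step, pv_cond_iff, h]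
    norm_num [PySem.List.pyGet?, PySem.List.pyIdx?, pvTail]
    rw [show ([12, 11, 9, 6, 3, 1] : List Int)[Int.toNat 3] = 6 from by decide]
    omega
  · simp only [List.foldl, pv_step, pv_cond_iff, h]
    norm_num [PySem.List.pyGet?, PySem.List.pyIdx?, pvTail]
    rw [show ([12, 11, 9, 6, 3, 1] : List Int)[Int.toNat 4] = 3 from by decide]
    omega
  · simp only [List.foldl, pv_step, pv_cond_iff, h]
    norm_num [PySem.List.pyGet?, PySem.List.pyIdx?, pvTail]
    rw [show ([12, 11, 9, 6, 3, 1] : List Int)[Int.toNat 5] = 1 from by decide]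
    omega
  · simp only [List.foldl, pv_step, pv_cond_iff]
    norm_num
    split_ifs <;> omega
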